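-- pv_equiv track=rewrite | github.com/Darveloper1/ubscc2025 | app.py | _replace_abs_bars
-- ===== SOURCE A (Python) =====
-- def _replace_abs_bars(s: str) -> str:
--     # Replace |...| with abs(...), supports multiple pairs.
--     res, open_flag = [], False
--     for ch in s:
--         if ch == "|":
--             if not open_flag:
--                 res.append("abs(")
--             else:
--                 res.append(")")
--             open_flag = not open_flag
--         else:
--             res.append(ch)
--     return "".join(res)
-- ===== SOURCE B (Python) =====
-- def _replace_abs_bars(s: str) -> str:
--     # Per-segment reassembly: split on '|' and rejoin with alternating 'abs(' / ')'.
--     parts = s.split('|')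
--     out = [parts[0]]
--     for i, p in enumerate(parts[1:]):
--         out.append('abs(' if i % 2 == 0 else ')')
--         out.append(p)
--     return ''.join(out)
-- ===== Notes on version B (the rewrite author's own statement) =====
-- stated objective: idiomatic
-- what changed: Replaces the per-character scan with a stateful open/close flag by splitting on the bar character and rejoining the segments with alternating opening/closing separators chosen by separator-index parity.
import Mathlib
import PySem

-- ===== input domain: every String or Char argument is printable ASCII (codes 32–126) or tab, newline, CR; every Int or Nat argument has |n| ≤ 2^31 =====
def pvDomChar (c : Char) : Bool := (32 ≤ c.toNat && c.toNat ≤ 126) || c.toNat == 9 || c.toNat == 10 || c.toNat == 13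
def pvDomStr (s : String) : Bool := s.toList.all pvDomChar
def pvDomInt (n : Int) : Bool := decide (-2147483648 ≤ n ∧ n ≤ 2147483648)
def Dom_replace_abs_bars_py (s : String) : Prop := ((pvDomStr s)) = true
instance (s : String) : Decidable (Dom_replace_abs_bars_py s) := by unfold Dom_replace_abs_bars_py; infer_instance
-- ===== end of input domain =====

-- B replaces A's per-character toggle scan by splitting on '|' and rejoining the
-- segments with alternating 'abs(' / ')' separators (objective: idiomatic).

-- ===== PORT A =====
-- state: (res : list of string pieces, open_flag); join at the end
def pvStepA (st : List (List Char) × Bool) (ch : Char) : List (List Char) × Bool :=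
  if ch = '|' then
    if st.2 = false then (st.1 ++ ["abs(".toList], true)
    else (st.1 ++ [")".toList], false)
  else (st.1 ++ [[ch]], st.2)

def replace_abs_bars_py (s : String) : String :=
  let r := s.toList.foldl pvStepA ([], false)
  String.ofList (PySem.Chars.join [] r.1)

-- ===== PORT B =====
-- fold body of B's for-loop: append the separator chosen by parity of i, then the segment
def pvStepB (out : List (List Char)) (ip : Int × List Char) : List (List Char) :=
  (out ++ [if PySem.Int.mod ip.1 2 = 0 then "abs(".toList else ")".toList]) ++ [ip.2]

def replace_abs_bars_py_alt (s : String) : String :=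
  let parts := PySem.Chars.splitOn s.toList ['|']
  let out := (PySem.List.enumerate parts.tail 0).foldl pvStepB [parts.headD []]
  String.ofList (PySem.Chars.join [] out)

-- ===== PRECONDITION & SPEC =====
def Spec_replace_abs_bars_py (s : String) (out : String) : Prop := out = replace_abs_bars_py_alt s
instance (s : String) (out : String) : Decidable (Spec_replace_abs_bars_py s out) := by unfold Spec_replace_abs_bars_py; infer_instance

-- ===== CLAIM (what is proved, stated in full; the proofs are below) =====
def Claim_equal_replace_abs_bars_py : Prop := ∀ (s : String), Dom_replace_abs_bars_py s → Spec_replace_abs_bars_py s (replace_abs_bars_py s)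

-- ===== LEMMAS AND PROOFS =====

-- A's result, directly recursive over the characters with the toggle flag
def pvAbsRec : List Char → Bool → List Char
  | [], _ => []
  | c :: cs, flag =>
    if c = '|' then
      (if flag then ')' :: pvAbsRec cs false else "abs(".toList ++ pvAbsRec cs true)
    else c :: pvAbsRec cs flag

-- B's reassembly of the segments after the first, flag = true means next separator is ')'
def pvGlue : List (List Char) → Bool → List Char
  | [], _ => []
  | p :: ps, flag => (if flag then [')'] else "abs(".toList) ++ p ++ pvGlue ps (!flag)

theorem pv_join_nil (xs : List (List Char)) : PySem.Chars.join [] xs = xs.flatten := by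
  induction xs with
  | nil => rfl
  | cons a l ih =>
    cases l with
    | nil => simp [PySem.Chars.join, List.intercalate]
    | cons b t =>
      simp only [PySem.Chars.join, List.intercalate] at *
      simp [List.intersperse] at *
      simpa using ih

theorem pv_foldA (l : List Char) : ∀ (res : List (List Char)) (flag : Bool),
    ((l.foldl pvStepA (res, flag)).1).flatten = res.flatten ++ pvAbsRec l flag := by
  induction l with
  | nil => intro res flag; simp [pvAbsRec]
  | cons c cs ih =>
    intro res flag
    by_cases hc : c = '|'
    · cases flag <;> simp [pvStepA, pvAbsRec, hc, ih]
    · simp [pvStepA, pvAbsRec, hc, ih]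

theorem pv_absRec_split (l : List Char) : ∀ (flag : Bool),
    pvAbsRec l flag
      = (List.splitOnP (· == '|') l).headD []
        ++ pvGlue (List.splitOnP (· == '|') l).tail flag := by
  induction l with
  | nil => intro flag; simp [pvAbsRec, pvGlue]
  | cons c cs ih =>
    intro flag
    obtain ⟨h, t, ht⟩ := List.exists_cons_of_ne_nil (List.splitOnP_ne_nil (· == '|') cs)
    by_cases hc : c = '|'
    · rw [List.splitOnP_cons]
      cases flag <;>
        simp [pvAbsRec, pvGlue, hc, ih, ht]
    · rw [List.splitOnP_cons]
      simp [pvAbsRec, hc, ih, ht, List.modifyHead]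

theorem pv_go_char (c : Char) : ∀ (fuel : Nat) (l cur : List Char) (acc : List (List Char)),
    l.length < fuel →
    PySem.Chars.splitOn.go [c] fuel l cur acc
      = acc.reverse ++ List.modifyHead (cur.reverse ++ ·) (List.splitOnP (· == c) l) := by
  intro fuel
  induction fuel with
  | zero => intro l cur acc h; omega
  | succ n ih =>
    intro l cur acc h
    cases l with
    | nil => simp [PySem.Chars.splitOn.go, List.modifyHead]
    | cons x rest =>
      rw [PySem.Chars.splitOn.go]
      by_cases hx : c = x
      · have hpre : List.isPrefixOf [c] (x :: rest) = true := by
          simp [List.isPrefixOf, hx]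
        rw [if_pos hpre]
        have hlen : rest.length < n := by simp at h; omega
        rw [ih _ _ _ (by simpa using hlen)]
        rw [List.splitOnP_cons]
        simp only [hx.symm, List.modifyHead, beq_self_eq_true, if_true, List.reverse_nil,
          List.reverse_cons, List.append_assoc, List.nil_append]
        cases hsp : List.splitOnP (fun x => x == c) rest <;> simp [hsp]
      · have hpre : List.isPrefixOf [c] (x :: rest) = false := by
          simp [List.isPrefixOf]; exact hx
        rw [if_neg (by simp [hpre])]
        have hlen : rest.length < n := by simp at h; omega
        rw [ih _ _ _ hlen]
        rw [List.splitOnP_cons]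
        have hx' : (x == c) = false := by simp; exact fun hh => hx hh.symm
        obtain ⟨hh, tt, htt⟩ := List.exists_cons_of_ne_nil (List.splitOnP_ne_nil (· == c) rest)
        simp [hx', htt, List.modifyHead]

theorem pv_splitOn_char (l : List Char) (c : Char) :
    PySem.Chars.splitOn l [c] = List.splitOnP (· == c) l := by
  rw [PySem.Chars.splitOn, pv_go_char c (l.length + 1) l [] [] (by omega)]
  obtain ⟨h, t, ht⟩ := List.exists_cons_of_ne_nil (List.splitOnP_ne_nil (· == c) l)
  simp [ht, List.modifyHead]

theorem pv_foldB (ps : List (List Char)) : ∀ (k : Nat) (out : List (List Char)),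
    ((PySem.List.enumerate ps (k : Int)).foldl pvStepB out).flatten
      = out.flatten ++ pvGlue ps (decide (k % 2 = 1)) := by
  induction ps with
  | nil => intro k out; simp [PySem.List.enumerate, pvGlue]
  | cons p ps ih =>
    intro k out
    rw [PySem.List.enumerate_cons]
    have hcast : ((k : Int) + 1) = ((k + 1 : Nat) : Int) := by push_cast; ring
    rw [List.foldl_cons, hcast, ih]
    have hmod : PySem.Int.mod (k : Int) 2 = ((k % 2 : Nat) : Int) := by
      simp [PySem.Int.mod, Int.fmod_eq_emod]
    by_cases hk : k % 2 = 1
    · have h2 : ¬ PySem.Int.mod (k : Int) 2 = 0 := by rw [hmod, hk]; decide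
      have h3 : (k + 1) % 2 = 0 := by omega
      simp only [pvStepB, if_neg h2, pvGlue, hk, h3]
      simp
    · have hk0 : k % 2 = 0 := by omega
      have h2 : PySem.Int.mod (k : Int) 2 = 0 := by rw [hmod, hk0]; rfl
      have h3 : (k + 1) % 2 = 1 := by omega
      simp only [pvStepB, if_pos h2, pvGlue, hk, h3]
      simp

-- ===== VERDICT (by name: the statement is the Claim_ definition above) =====
theorem replace_abs_bars_py_spec : Claim_equal_replace_abs_bars_py := by
  intro s _
  unfold Spec_replace_abs_bars_py replace_abs_bars_py replace_abs_bars_py_alt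
  simp only [pv_join_nil, pv_splitOn_char]
  rw [pv_foldA]
  have hb := pv_foldB (List.splitOnP (fun x => x == '|') s.toList).tail 0
      [(List.splitOnP (fun x => x == '|') s.toList).headD []]
  simp only [Nat.cast_zero] at hb
  rw [hb, pv_absRec_split]
  simp
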